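-- pv_equiv track=rewrite | github.com/APB-LDN/APB-LDN.github.io | scripts/update_content.py | _image_ext
-- ===== SOURCE A (Python) =====
-- def _image_ext(url: str, content_type: str = "") -> str:
--     """Infer a file extension from URL or Content-Type header."""
--     for ext in (".jpg", ".jpeg", ".png", ".webp", ".gif", ".svg"):
--         if url.lower().split("?")[0].endswith(ext):
--             return ext.replace(".jpeg", ".jpg")
--     if "png" in content_type:
--         return ".png"
--     if "svg" in content_type:
--         return ".svg"
--     if "webp" in content_type:
--         return ".webp"
--     return ".jpg"
-- ===== SOURCE B (Python) =====
-- def _image_ext(url: str, content_type: str = "") -> str: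
--     """Infer a file extension from URL or Content-Type header."""
--     stem, dot, ext = url.lower().partition("?")[0].rpartition(".")
--     if dot:
--         match ext:
--             case "jpg" | "jpeg":
--                 return ".jpg"
--             case "png":
--                 return ".png"
--             case "webp":
--                 return ".webp"
--             case "gif":
--                 return ".gif"
--             case "svg":
--                 return ".svg"
--     for t in ("png", "svg", "webp"):
--         if t in content_type:
--             return "." + t
--     return ".jpg"
-- ===== Notes on version B (the rewrite author's own statement) =====
-- stated objective: idiomatic
-- what changed: B never iterates over candidate extensions: it splits off the query with partition, extracts the text after the last dot with rpartition, and dispatches on that extension with a single structural match statement; the content-type fallback becomes a data-driven loop over ('png','svg','webp') instead of A's if-chain of six endswith suffix tests plus three membership ifs.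
import Mathlib
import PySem

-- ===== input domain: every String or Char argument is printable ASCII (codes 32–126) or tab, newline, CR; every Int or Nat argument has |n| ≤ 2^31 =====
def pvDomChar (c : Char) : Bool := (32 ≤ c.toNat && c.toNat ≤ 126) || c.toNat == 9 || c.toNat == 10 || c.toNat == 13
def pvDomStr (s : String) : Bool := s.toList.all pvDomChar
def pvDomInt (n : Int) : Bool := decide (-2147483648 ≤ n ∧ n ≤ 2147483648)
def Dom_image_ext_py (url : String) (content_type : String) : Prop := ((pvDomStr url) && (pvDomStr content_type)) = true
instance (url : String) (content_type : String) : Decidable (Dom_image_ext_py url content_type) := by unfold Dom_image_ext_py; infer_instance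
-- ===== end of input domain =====

-- B re-implements the inference idiomatically: rpartition off the text after the
-- last dot and dispatch on it once (no iteration over candidate extensions), with a
-- data-driven loop for the content-type fallback; same values everywhere.

-- ===== PORT A =====
-- A's content-type fallback if-chain
def ctFallback (content_type : String) : String :=
  if PySem.Str.isIn "png" content_type then ".png"
  else if PySem.Str.isIn "svg" content_type then ".svg"
  else if PySem.Str.isIn "webp" content_type then ".webp"
  else ".jpg"

-- A's for-loop with early return over the candidate extensions
def imageExtLoopA (path : String) : List String → Option String
  | [] => none
  | e :: rest =>
    if PySem.Str.endswith path e then some (PySem.Str.replace e ".jpeg" ".jpg")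
    else imageExtLoopA path rest

def image_ext_py (url : String) (content_type : String) : String :=
  let path := ((PySem.Str.split? (PySem.Str.lower url) "?").getD []).headD ""
  (imageExtLoopA path [".jpg", ".jpeg", ".png", ".webp", ".gif", ".svg"]).getD
    (ctFallback content_type)

-- ===== PORT B =====
-- hand port of str.rpartition(".") (PySem has no rpartition): split at the LAST dot;
-- exact: Python returns (before, ".", after), or ('', '', s) when no dot occurs
def rpartitionDot (s : List Char) : List Char × List Char × List Char :=
  match s.reverse.dropWhile (· ≠ '.') with
  | [] => ([], [], s)
  | _ :: tl => (tl.reverse, ['.'], (s.reverse.takeWhile (· ≠ '.')).reverse)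

-- Source B's match statement on the extension (literal cases = equality dispatch)
def matchExt (ext : String) : Option String :=
  if ext = "jpg" ∨ ext = "jpeg" then some ".jpg"
  else if ext = "png" then some ".png"
  else if ext = "webp" then some ".webp"
  else if ext = "gif" then some ".gif"
  else if ext = "svg" then some ".svg"
  else none

-- Source B's for-loop over ("png","svg","webp") with default ".jpg"
def ctLoop : List String → String → String
  | [], _ => ".jpg"
  | t :: rest, ct => if PySem.Str.isIn t ct then "." ++ t else ctLoop rest ct

def image_ext_py_alt (url : String) (content_type : String) : String :=
  -- url.lower().partition("?")[0] : the part before the first '?'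
  let path := (PySem.Str.lower url).toList.takeWhile (· ≠ '?')
  let r := rpartitionDot path
  (if r.2.1 ≠ [] then matchExt (String.ofList r.2.2) else none).getD
    (ctLoop ["png", "svg", "webp"] content_type)

-- ===== PRECONDITION & SPEC =====
def Spec_image_ext_py (url : String) (content_type : String) (out : String) : Prop := out = image_ext_py_alt url content_type
instance (url : String) (content_type : String) (out : String) : Decidable (Spec_image_ext_py url content_type out) := by unfold Spec_image_ext_py; infer_instance

-- ===== CLAIM (what is proved, stated in full; the proofs are below) =====
def Claim_equal_image_ext_py : Prop := ∀ (url : String) (content_type : String), Dom_image_ext_py url content_type → Spec_image_ext_py url content_type (image_ext_py url content_type)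

-- ===== LEMMAS AND PROOFS =====

-- the two fallbacks agree
lemma fallback_eq (ct : String) : ctLoop ["png", "svg", "webp"] ct = ctFallback ct := by
  simp only [ctLoop, ctFallback]
  split_ifs <;> rfl

-- splitOn.go with an accumulator = accumulator ++ the run with empty accumulator
lemma splitOn_go_acc (sep : List Char) (fuel : Nat) :
    ∀ (l cur : List Char) (acc : List (List Char)),
      PySem.Chars.splitOn.go sep fuel l cur acc =
        acc.reverse ++ PySem.Chars.splitOn.go sep fuel l cur [] := by
  induction fuel with
  | zero => intro l cur acc; simp [PySem.Chars.splitOn.go]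
  | succ f ih =>
    intro l cur acc
    cases l with
    | nil => simp [PySem.Chars.splitOn.go]
    | cons c rest =>
      simp only [PySem.Chars.splitOn.go]
      split
      · rw [ih _ _ (cur.reverse :: acc), ih _ _ [cur.reverse]]
        simp
      · exact ih _ _ acc

-- the first piece of a '?'-split is the takeWhile before the first '?'
lemma splitOn_go_head (fuel : Nat) :
    ∀ (l cur : List Char), l.length ≤ fuel →
      ∃ rest, PySem.Chars.splitOn.go ['?'] fuel l cur [] =
        (cur.reverse ++ l.takeWhile (· ≠ '?')) :: rest := by
  induction fuel with
  | zero =>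
    intro l cur h
    have : l = [] := List.eq_nil_of_length_eq_zero (Nat.le_zero.mp h)
    subst this
    exact ⟨[], by simp [PySem.Chars.splitOn.go]⟩
  | succ f ih =>
    intro l cur h
    cases l with
    | nil => exact ⟨[], by simp [PySem.Chars.splitOn.go]⟩
    | cons c rest =>
      by_cases hc : c = '?'
      · subst hc
        have hpf : (['?'] : List Char).isPrefixOf ('?' :: rest) = true := by
          simp [List.isPrefixOf]
        simp only [PySem.Chars.splitOn.go, hpf, if_pos]
        rw [splitOn_go_acc]
        refine ⟨PySem.Chars.splitOn.go ['?'] f (List.drop 1 ('?' :: rest)) [] [], ?_⟩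
        simp [List.takeWhile]
      · have hpf : (['?'] : List Char).isPrefixOf (c :: rest) = false := by
          simp [List.isPrefixOf]; exact fun hcc => absurd hcc.symm hc
        simp only [PySem.Chars.splitOn.go, hpf]
        simp only [Bool.false_eq_true, if_false]
        obtain ⟨r, hr⟩ := ih rest (c :: cur) (by simpa using Nat.lt_succ_iff.mp (by simpa using h))
        refine ⟨r, ?_⟩
        rw [hr]
        have : (c :: rest).takeWhile (· ≠ '?') = c :: rest.takeWhile (· ≠ '?') := by
          simp [hc]
        rw [this]
        simp

-- A's path (head of the '?'-split) as a character list = B's takeWhile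
lemma pathA_toList (s : String) :
    (((PySem.Str.split? s "?").getD []).headD "").toList = s.toList.takeWhile (· ≠ '?') := by
  obtain ⟨rest, hr⟩ := splitOn_go_head (s.toList.length + 1) s.toList []
    (Nat.le_succ _)
  simp only [PySem.Str.split?, PySem.Chars.split?]
  have hsep : ("?").toList = ['?'] := by decide
  rw [hsep]
  simp only [List.isEmpty_cons, PySem.Chars.splitOn]
  rw [hr]
  simp

-- uniqueness of the after-the-last-dot segment
lemma takeWhile_all_cons {p : Char → Bool} (a : List Char) (c : Char) (b : List Char)
    (ha : ∀ x ∈ a, p x = true) (hc : p c = false) :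
    (a ++ c :: b).takeWhile p = a := by
  induction a with
  | nil => simp [hc]
  | cons x xs ih =>
    have hx : p x = true := ha x (by simp)
    simp only [List.cons_append, List.takeWhile, hx]
    rw [ih (fun y hy => ha y (by simp [hy]))]

lemma last_dot_unique (pre w pre' e : List Char) (hw : '.' ∉ w) (he : '.' ∉ e)
    (h : pre ++ '.' :: w = pre' ++ '.' :: e) : w = e := by
  have hrev : w.reverse ++ '.' :: pre.reverse = e.reverse ++ '.' :: pre'.reverse := by
    have := congrArg List.reverse h
    simpa using this
  have h1 : (w.reverse ++ '.' :: pre.reverse).takeWhile (· ≠ '.') = w.reverse :=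
    takeWhile_all_cons _ _ _
      (fun x hx => by simp; exact fun hxe => hw (by rw [← hxe]; exact List.mem_reverse.mp hx))
      (by simp)
  have h2 : (e.reverse ++ '.' :: pre'.reverse).takeWhile (· ≠ '.') = e.reverse :=
    takeWhile_all_cons _ _ _
      (fun x hx => by simp; exact fun hxe => he (by rw [← hxe]; exact List.mem_reverse.mp hx))
      (by simp)
  have : w.reverse = e.reverse := by rw [← h1, ← h2, hrev]
  simpa using List.reverse_injective this

-- endswith through a last-dot decomposition: exactly one extension can match
lemma ends_iff (pl pre w : List Char) (hpl : pl = pre ++ '.' :: w) (hw : '.' ∉ w)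
    (ext : List Char) (hext : '.' ∉ ext) :
    ('.' :: ext <:+ pl) ↔ w = ext := by
  constructor
  · rintro ⟨pre', hpre'⟩
    exact last_dot_unique pre w pre' ext hw hext (by rw [hpl] at hpre'; exact hpre'.symm)
  · rintro rfl
    rw [hpl]
    exact List.suffix_append _ _
-- endswith of a candidate on String.ofList pl, as a suffix statement
lemma endswith_ofList (pl : List Char) (e : String) :
    PySem.Str.endswith (String.ofList pl) e = true ↔ e.toList <:+ pl := by
  rw [PySem.Str.endswith_eq, String.toList_ofList, PySem.Chars.endswith_iff]

-- the first element surviving dropWhile fails the predicate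
lemma dropWhile_cons_false {α : Type} {p : α → Bool} :
    ∀ (l : List α) (c : α) (tl : List α), l.dropWhile p = c :: tl → p c = false := by
  intro l
  induction l with
  | nil => intro c tl h; simp [List.dropWhile] at h
  | cons x xs ih =>
    intro c tl h
    simp only [List.dropWhile] at h
    rcases hx : p x with _ | _
    · rw [hx] at h
      cases h
      exact hx
    · rw [hx] at h
      exact ih c tl h

-- the heart: A's candidate loop = B's rpartition + match, on any path
lemma core (pl : List Char) (ct : String) :
    (imageExtLoopA (String.ofList pl) [".jpg", ".jpeg", ".png", ".webp", ".gif", ".svg"]).getD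
      (ctFallback ct) =
    (if (rpartitionDot pl).2.1 ≠ [] then matchExt (String.ofList (rpartitionDot pl).2.2)
      else none).getD (ctLoop ["png", "svg", "webp"] ct) := by
  rw [fallback_eq]
  rcases hd : pl.reverse.dropWhile (· ≠ '.') with _ | ⟨c, tl⟩
  · -- no dot anywhere in pl: both sides fall through
    have hall : ∀ x ∈ pl, x ≠ '.' := by
      intro x hx
      have := (List.dropWhile_eq_nil_iff.mp hd) x (List.mem_reverse.mpr hx)
      simpa using this
    have hends : ∀ e : String, '.' ∈ e.toList →
        PySem.Str.endswith (String.ofList pl) e = false := by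
      intro e hdot
      by_contra hc
      have : e.toList <:+ pl := (endswith_ofList pl e).mp (by revert hc; cases PySem.Str.endswith (String.ofList pl) e <;> simp)
      exact hall '.' (this.subset hdot) rfl
    simp only [rpartitionDot, hd, ne_eq, not_true_eq_false, if_false]
    simp only [imageExtLoopA,
      hends ".jpg" (by decide), hends ".jpeg" (by decide), hends ".png" (by decide),
      hends ".webp" (by decide), hends ".gif" (by decide), hends ".svg" (by decide)]
    simp
  · -- pl = pre ++ '.' :: w with w dot-free (w = text after the LAST dot)
    have hc : c = '.' := by
      have := dropWhile_cons_false pl.reverse c tl hd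
      simpa using this
    subst hc
    have hw : '.' ∉ (pl.reverse.takeWhile (· ≠ '.')).reverse := by
      intro hmem
      have := List.mem_takeWhile_imp (List.mem_reverse.mp hmem)
      simp at this
    have hdecomp : pl = tl.reverse ++ '.' :: (pl.reverse.takeWhile (· ≠ '.')).reverse := by
      have h1 : pl.reverse.takeWhile (· ≠ '.') ++ '.' :: tl = pl.reverse := by
        rw [← hd]; exact List.takeWhile_append_dropWhile
      have := congrArg List.reverse h1
      simpa using this.symm
    set w := (pl.reverse.takeWhile (· ≠ '.')).reverse with hwdef
    have hiff : ∀ ext : List Char, '.' ∉ ext →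
        (PySem.Str.endswith (String.ofList pl) (String.ofList ('.' :: ext)) = true ↔ w = ext) := by
      intro ext hext
      rw [endswith_ofList, String.toList_ofList]
      exact ends_iff pl tl.reverse w hdecomp hw ext hext
    simp only [rpartitionDot, hd, ne_eq, ← hwdef]
    simp only [reduceCtorEq, not_false_eq_true, if_true]
    -- dispatch on which (unique) extension w is
    by_cases h1 : w = "jpg".toList
    · have := (hiff "jpg".toList (by decide)).mpr h1
      rw [(by decide : String.ofList ('.' :: "jpg".toList) = ".jpg")] at this
      simp only [imageExtLoopA, this, if_true, h1]
      rw [(by decide : matchExt (String.ofList ("jpg".toList)) = some ".jpg"), (by decide : PySem.Str.replace ".jpg" ".jpeg" ".jpg" = ".jpg")]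
    by_cases h2 : w = "jpeg".toList
    · have ht := (hiff "jpeg".toList (by decide)).mpr h2
      rw [(by decide : String.ofList ('.' :: "jpeg".toList) = ".jpeg")] at ht
      have hf : PySem.Str.endswith (String.ofList pl) ".jpg" = false := by
        by_contra hcc
        have : w = "jpg".toList := by
          apply (hiff "jpg".toList (by decide)).mp
          rw [(by decide : String.ofList ('.' :: "jpg".toList) = ".jpg")]
          revert hcc; cases PySem.Str.endswith (String.ofList pl) ".jpg" <;> simp
        exact h1 this
      simp only [imageExtLoopA, hf, ht, if_true, h2]
      rw [(by decide : matchExt (String.ofList ("jpeg".toList)) = some ".jpg"), (by decide : PySem.Str.replace ".jpeg" ".jpeg" ".jpg" = ".jpg")]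
      simp
    by_cases h3 : w = "png".toList
    case pos =>
      have ht := (hiff "png".toList (by decide)).mpr h3
      rw [(by decide : String.ofList ('.' :: "png".toList) = ".png")] at ht
      have hf1 : PySem.Str.endswith (String.ofList pl) ".jpg" = false := by
        by_contra hcc
        exact h1 ((hiff "jpg".toList (by decide)).mp (by rw [(by decide : String.ofList ('.' :: "jpg".toList) = ".jpg")]; revert hcc; cases PySem.Str.endswith (String.ofList pl) ".jpg" <;> simp))
      have hf2 : PySem.Str.endswith (String.ofList pl) ".jpeg" = false := by
        by_contra hcc
        exact h2 ((hiff "jpeg".toList (by decide)).mp (by rw [(by decide : String.ofList ('.' :: "jpeg".toList) = ".jpeg")]; revert hcc; cases PySem.Str.endswith (String.ofList pl) ".jpeg" <;> simp))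
      simp only [imageExtLoopA, hf1, hf2, ht, if_true, h3]
      rw [(by decide : matchExt (String.ofList ("png".toList)) = some ".png"), (by decide : PySem.Str.replace ".png" ".jpeg" ".jpg" = ".png")]
      simp
    case neg =>
    by_cases h4 : w = "webp".toList
    case pos =>
      have ht := (hiff "webp".toList (by decide)).mpr h4
      rw [(by decide : String.ofList ('.' :: "webp".toList) = ".webp")] at ht
      have hf1 : PySem.Str.endswith (String.ofList pl) ".jpg" = false := by
        by_contra hcc
        exact h1 ((hiff "jpg".toList (by decide)).mp (by rw [(by decide : String.ofList ('.' :: "jpg".toList) = ".jpg")]; revert hcc; cases PySem.Str.endswith (String.ofList pl) ".jpg" <;> simp))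
      have hf2 : PySem.Str.endswith (String.ofList pl) ".jpeg" = false := by
        by_contra hcc
        exact h2 ((hiff "jpeg".toList (by decide)).mp (by rw [(by decide : String.ofList ('.' :: "jpeg".toList) = ".jpeg")]; revert hcc; cases PySem.Str.endswith (String.ofList pl) ".jpeg" <;> simp))
      have hf3 : PySem.Str.endswith (String.ofList pl) ".png" = false := by
        by_contra hcc
        exact h3 ((hiff "png".toList (by decide)).mp (by rw [(by decide : String.ofList ('.' :: "png".toList) = ".png")]; revert hcc; cases PySem.Str.endswith (String.ofList pl) ".png" <;> simp))
      simp only [imageExtLoopA, hf1, hf2, hf3, ht, if_true, h4]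
      rw [(by decide : matchExt (String.ofList ("webp".toList)) = some ".webp"), (by decide : PySem.Str.replace ".webp" ".jpeg" ".jpg" = ".webp")]
      simp
    case neg =>
    by_cases h5 : w = "gif".toList
    case pos =>
      have ht := (hiff "gif".toList (by decide)).mpr h5
      rw [(by decide : String.ofList ('.' :: "gif".toList) = ".gif")] at ht
      have hf1 : PySem.Str.endswith (String.ofList pl) ".jpg" = false := by
        by_contra hcc
        exact h1 ((hiff "jpg".toList (by decide)).mp (by rw [(by decide : String.ofList ('.' :: "jpg".toList) = ".jpg")]; revert hcc; cases PySem.Str.endswith (String.ofList pl) ".jpg" <;> simp))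
      have hf2 : PySem.Str.endswith (String.ofList pl) ".jpeg" = false := by
        by_contra hcc
        exact h2 ((hiff "jpeg".toList (by decide)).mp (by rw [(by decide : String.ofList ('.' :: "jpeg".toList) = ".jpeg")]; revert hcc; cases PySem.Str.endswith (String.ofList pl) ".jpeg" <;> simp))
      have hf3 : PySem.Str.endswith (String.ofList pl) ".png" = false := by
        by_contra hcc
        exact h3 ((hiff "png".toList (by decide)).mp (by rw [(by decide : String.ofList ('.' :: "png".toList) = ".png")]; revert hcc; cases PySem.Str.endswith (String.ofList pl) ".png" <;> simp))
      have hf4 : PySem.Str.endswith (String.ofList pl) ".webp" = false := by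
        by_contra hcc
        exact h4 ((hiff "webp".toList (by decide)).mp (by rw [(by decide : String.ofList ('.' :: "webp".toList) = ".webp")]; revert hcc; cases PySem.Str.endswith (String.ofList pl) ".webp" <;> simp))
      simp only [imageExtLoopA, hf1, hf2, hf3, hf4, ht, if_true, h5]
      rw [(by decide : matchExt (String.ofList ("gif".toList)) = some ".gif"), (by decide : PySem.Str.replace ".gif" ".jpeg" ".jpg" = ".gif")]
      simp
    case neg =>
    by_cases h6 : w = "svg".toList
    case pos =>
      have ht := (hiff "svg".toList (by decide)).mpr h6
      rw [(by decide : String.ofList ('.' :: "svg".toList) = ".svg")] at ht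
      have hf1 : PySem.Str.endswith (String.ofList pl) ".jpg" = false := by
        by_contra hcc
        exact h1 ((hiff "jpg".toList (by decide)).mp (by rw [(by decide : String.ofList ('.' :: "jpg".toList) = ".jpg")]; revert hcc; cases PySem.Str.endswith (String.ofList pl) ".jpg" <;> simp))
      have hf2 : PySem.Str.endswith (String.ofList pl) ".jpeg" = false := by
        by_contra hcc
        exact h2 ((hiff "jpeg".toList (by decide)).mp (by rw [(by decide : String.ofList ('.' :: "jpeg".toList) = ".jpeg")]; revert hcc; cases PySem.Str.endswith (String.ofList pl) ".jpeg" <;> simp))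
      have hf3 : PySem.Str.endswith (String.ofList pl) ".png" = false := by
        by_contra hcc
        exact h3 ((hiff "png".toList (by decide)).mp (by rw [(by decide : String.ofList ('.' :: "png".toList) = ".png")]; revert hcc; cases PySem.Str.endswith (String.ofList pl) ".png" <;> simp))
      have hf4 : PySem.Str.endswith (String.ofList pl) ".webp" = false := by
        by_contra hcc
        exact h4 ((hiff "webp".toList (by decide)).mp (by rw [(by decide : String.ofList ('.' :: "webp".toList) = ".webp")]; revert hcc; cases PySem.Str.endswith (String.ofList pl) ".webp" <;> simp))
      have hf5 : PySem.Str.endswith (String.ofList pl) ".gif" = false := by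
        by_contra hcc
        exact h5 ((hiff "gif".toList (by decide)).mp (by rw [(by decide : String.ofList ('.' :: "gif".toList) = ".gif")]; revert hcc; cases PySem.Str.endswith (String.ofList pl) ".gif" <;> simp))
      simp only [imageExtLoopA, hf1, hf2, hf3, hf4, hf5, ht, if_true, h6]
      rw [(by decide : matchExt (String.ofList ("svg".toList)) = some ".svg"), (by decide : PySem.Str.replace ".svg" ".jpeg" ".jpg" = ".svg")]
      simp
    case neg =>
    -- default: no candidate extension; both sides fall back to the content type
    have hf : ∀ (ext : List Char), '.' ∉ ext → w ≠ ext →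
        PySem.Str.endswith (String.ofList pl) (String.ofList ('.' :: ext)) = false := by
      intro ext hext hne
      by_contra hcc
      exact hne ((hiff ext hext).mp (by revert hcc; cases PySem.Str.endswith (String.ofList pl) (String.ofList ('.' :: ext)) <;> simp))
    have hf1 := hf "jpg".toList (by decide) h1
    have hf2 := hf "jpeg".toList (by decide) h2
    have hf3 := hf "png".toList (by decide) h3
    have hf4 := hf "webp".toList (by decide) h4
    have hf5 := hf "gif".toList (by decide) h5
    have hf6 := hf "svg".toList (by decide) h6
    rw [(by decide : String.ofList ('.' :: "jpg".toList) = ".jpg")] at hf1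
    rw [(by decide : String.ofList ('.' :: "jpeg".toList) = ".jpeg")] at hf2
    rw [(by decide : String.ofList ('.' :: "png".toList) = ".png")] at hf3
    rw [(by decide : String.ofList ('.' :: "webp".toList) = ".webp")] at hf4
    rw [(by decide : String.ofList ('.' :: "gif".toList) = ".gif")] at hf5
    rw [(by decide : String.ofList ('.' :: "svg".toList) = ".svg")] at hf6
    have hmatch : matchExt (String.ofList w) = none := by
      have hne : ∀ t : String, w ≠ t.toList → String.ofList w ≠ t := by
        intro t hwt he
        exact hwt (by rw [← String.toList_ofList (l := w), he])
      simp only [matchExt,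
        hne "jpg" h1, hne "jpeg" h2, hne "png" h3, hne "webp" h4, hne "gif" h5, hne "svg" h6]
      simp
    simp only [imageExtLoopA, hf1, hf2, hf3, hf4, hf5, hf6, hmatch]
    simp

-- ===== VERDICT (by name: the statement is the Claim_ definition above) =====
theorem image_ext_py_spec : Claim_equal_image_ext_py := by
  intro url ct _
  unfold Spec_image_ext_py
  show image_ext_py url ct = image_ext_py_alt url ct
  unfold image_ext_py image_ext_py_alt
  have hpath : ((PySem.Str.split? (PySem.Str.lower url) "?").getD []).headD "" =
      String.ofList ((PySem.Str.lower url).toList.takeWhile (· ≠ '?')) := by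
    rw [← pathA_toList (PySem.Str.lower url), String.ofList_toList]
  rw [hpath]
  exact core _ ct
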